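-- pv_equiv track=rewrite | github.com/soyHenry/Python-Prep | Workbench/Taller/OrdenarDiccionario.py | OrdenarDiccionario
-- ===== SOURCE A (Python) =====
-- def OrdenarDiccionario(diccionario_par, clave, descendente=True):
--     cantidadValores=0
--     newArr=[]
--     newArrSorted=[]
--     res ={}
--     if not (type(diccionario_par) is dict):
--         return None
--     if not (clave in diccionario_par.keys()):
--         return None
--     if len(diccionario_par[list(diccionario_par.keys())[0]])>0:
--         cantidadValores=len(diccionario_par[list(diccionario_par.keys())[0]])
--         for i in range(0, cantidadValores):
--             newObj={}
--             for key in diccionario_par: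
--                 newObj[key]=diccionario_par[key][i]
--             newArr.append(newObj)
--         newArrSorted = sorted(newArr, key=lambda d: d[clave], reverse=not (descendente))
--         for key in diccionario_par:
--             newArr2 = []
--             for i in range(0, cantidadValores):
--                 newArr2.append(newArrSorted[i][key])
--             res[key] = newArr2
--     else:
--             return diccionario_par
--
--     return res
-- ===== SOURCE B (Python) =====
-- def OrdenarDiccionario(diccionario_par, clave, descendente=True):
--     if type(diccionario_par) is not dict:
--         return None
--     if clave not in diccionario_par:
--         return None
--     n = len(next(iter(diccionario_par.values())))
--     if n == 0:
--         return diccionario_par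
--     key_col = diccionario_par[clave]
--     order = sorted(range(n), key=lambda i: key_col[i], reverse=not descendente)
--     return {k: [v[i] for i in order] for k, v in diccionario_par.items()}
-- ===== Notes on version B (the rewrite author's own statement) =====
-- stated objective: simpler
-- what changed: Instead of materializing one row-dict per index, sorting the row dicts and reading columns back out of them, B sorts the index permutation by the key column once and rebuilds each output column directly as [v[i] for i in order].
import Mathlib
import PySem

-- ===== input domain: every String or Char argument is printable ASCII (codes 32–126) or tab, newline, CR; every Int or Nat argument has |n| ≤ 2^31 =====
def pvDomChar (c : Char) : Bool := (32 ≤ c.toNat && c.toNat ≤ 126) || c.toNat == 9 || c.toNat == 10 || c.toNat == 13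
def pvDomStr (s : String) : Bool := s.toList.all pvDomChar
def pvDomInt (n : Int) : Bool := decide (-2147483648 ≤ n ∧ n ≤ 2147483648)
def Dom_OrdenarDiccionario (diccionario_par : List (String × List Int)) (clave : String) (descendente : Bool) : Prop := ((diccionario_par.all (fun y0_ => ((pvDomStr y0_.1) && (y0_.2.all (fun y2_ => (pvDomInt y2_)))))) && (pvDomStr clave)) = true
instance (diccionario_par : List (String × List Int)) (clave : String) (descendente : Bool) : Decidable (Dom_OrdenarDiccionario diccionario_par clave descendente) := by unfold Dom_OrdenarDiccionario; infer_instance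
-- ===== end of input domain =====

-- B replaces A's per-row dicts (build rows, sort the rows, read the columns back out) by one
-- sorted index permutation applied column-wise; same return value, proved equal on Pre_.

-- ===== PORT A =====
-- d[k] for a key of the dict: first match in insertion order
def pvLookup (d : List (String × List Int)) (k : String) : List Int :=
  ((d.find? (fun p => p.1 == k)).map Prod.snd).getD []

def OrdenarDiccionario (diccionario_par : List (String × List Int)) (clave : String) (descendente : Bool) : Option (List (String × List Int)) :=
  -- `type(diccionario_par) is dict` always holds for the modelled type, so that guard is omitted
  if clave ∈ diccionario_par.map Prod.fst then
    -- len(diccionario_par[list(diccionario_par.keys())[0]])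
    let cantidadValores : Nat :=
      (pvLookup diccionario_par ((diccionario_par.map Prod.fst).headD "")).length
    if 0 < cantidadValores then
      -- for i in range(0, cantidadValores): newObj = {}; for key: newObj[key] = d[key][i]; newArr.append(newObj)
      let newArr : List (PySem.Dict String Int) :=
        (PySem.List.pyRange 0 (cantidadValores : Int) 1).foldl (fun acc i =>
          acc ++ [diccionario_par.foldl (fun obj p =>
            obj.insert p.1 (PySem.List.pyGetD (pvLookup diccionario_par p.1) i 0)) PySem.Dict.empty]) []
      -- sorted(newArr, key=lambda d: d[clave], reverse=not descendente)
      let newArrSorted := PySem.List.sorted newArr (fun obj => obj.getD clave 0) (!descendente)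
      -- for key: newArr2 = []; for i: newArr2.append(newArrSorted[i][key]); res[key] = newArr2
      let res : PySem.Dict String (List Int) :=
        diccionario_par.foldl (fun r p =>
          r.insert p.1 ((PySem.List.pyRange 0 (cantidadValores : Int) 1).foldl (fun acc i =>
            acc ++ [(PySem.List.pyGetD newArrSorted i PySem.Dict.empty).getD p.1 0]) [])) PySem.Dict.empty
      some res.items
    else
      some diccionario_par
  else none

-- ===== PORT B =====
def OrdenarDiccionario_alt (diccionario_par : List (String × List Int)) (clave : String) (descendente : Bool) : Option (List (String × List Int)) :=
  if clave ∈ diccionario_par.map Prod.fst then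
    -- n = len(next(iter(diccionario_par.values())))
    let n : Nat := (diccionario_par.headD ("", [])).2.length
    if n = 0 then some diccionario_par
    else
      -- order = sorted(range(n), key=lambda i: key_col[i], reverse=not descendente)
      let keyCol := pvLookup diccionario_par clave
      let order := PySem.List.sorted (PySem.List.pyRange 0 (n : Int) 1)
        (fun i => PySem.List.pyGetD keyCol i 0) (!descendente)
      -- {k: [v[i] for i in order] for k, v in diccionario_par.items()}
      some (diccionario_par.map (fun p => (p.1, order.map (fun i => PySem.List.pyGetD p.2 i 0))))
  else none

-- ===== PRECONDITION & SPEC =====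
-- Pre_ excludes (i) association lists with duplicate keys, which a Python dict cannot contain (A
-- and B, fed the collapsed dict, agree there), and (ii) inputs where clave is present, the first
-- column is nonempty and some column is shorter than it, on which A raises IndexError.
def Pre_OrdenarDiccionario (diccionario_par : List (String × List Int)) (clave : String) (descendente : Bool) : Prop :=
  (diccionario_par.map Prod.fst).Nodup ∧
  (clave ∈ diccionario_par.map Prod.fst →
    ∀ p ∈ diccionario_par, (diccionario_par.headD ("", [])).2.length ≤ p.2.length)
instance (diccionario_par : List (String × List Int)) (clave : String) (descendente : Bool) : Decidable (Pre_OrdenarDiccionario diccionario_par clave descendente) := by unfold Pre_OrdenarDiccionario; infer_instance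

def pvWitness_OrdenarDiccionario : (List (String × List Int)) × String × Bool :=
  ([("a", [3, 1, 2]), ("b", [10, 20, 30])], "a", true)

def Spec_OrdenarDiccionario (diccionario_par : List (String × List Int)) (clave : String) (descendente : Bool) (out : Option (List (String × List Int))) : Prop := out = OrdenarDiccionario_alt diccionario_par clave descendente
instance (diccionario_par : List (String × List Int)) (clave : String) (descendente : Bool) (out : Option (List (String × List Int))) : Decidable (Spec_OrdenarDiccionario diccionario_par clave descendente out) := by unfold Spec_OrdenarDiccionario; infer_instance

-- ===== CLAIM (what is proved, stated in full; the proofs are below) =====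
def Claim_equal_OrdenarDiccionario : Prop := ∀ (diccionario_par : List (String × List Int)) (clave : String) (descendente : Bool), Dom_OrdenarDiccionario diccionario_par clave descendente → Pre_OrdenarDiccionario diccionario_par clave descendente → Spec_OrdenarDiccionario diccionario_par clave descendente (OrdenarDiccionario diccionario_par clave descendente)

-- ===== LEMMAS AND PROOFS =====

theorem pv_insertBy_map {α β : Type} (f : α → β) (b : β → β → Bool) (b' : α → α → Bool)
    (h : ∀ a y, b (f a) (f y) = b' a y) (x : α) (ys : List α) :
    PySem.List.insertBy b (f x) (ys.map f) = (PySem.List.insertBy b' x ys).map f := by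
  induction ys with
  | nil => simp [PySem.List.insertBy]
  | cons y ys ih =>
    simp only [List.map_cons, PySem.List.insertBy, h]
    by_cases hb : b' x y
    · simp [hb]
    · simp [hb, ih]

theorem pv_foldl_insertBy_map {α β : Type} (f : α → β) (b : β → β → Bool) (b' : α → α → Bool)
    (h : ∀ a y, b (f a) (f y) = b' a y) (l : List α) (acc : List α) :
    (l.map f).foldl (fun acc x => PySem.List.insertBy b x acc) (acc.map f)
      = (l.foldl (fun acc x => PySem.List.insertBy b' x acc) acc).map f := by
  induction l generalizing acc with
  | nil => rfl
  | cons x l ih =>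
    rw [List.map_cons, List.foldl_cons, List.foldl_cons, pv_insertBy_map f b b' h, ih]

-- sorted (l.map f) by key g = (sorted l by g ∘ f).map f — A sorts the rows, B sorts the indices
theorem pv_sorted_map {α β κ : Type} [LT κ] [DecidableLT κ] (f : α → β) (g : β → κ) (g' : α → κ)
    (h : ∀ a, g (f a) = g' a) (l : List α) (rev : Bool) :
    PySem.List.sorted (l.map f) g rev = (PySem.List.sorted l g' rev).map f := by
  cases rev with
  | false =>
    rw [PySem.List.sorted_eq_foldl_insertBy, PySem.List.sorted_eq_foldl_insertBy]
    simpa using pv_foldl_insertBy_map f _ _ (fun a y => by simp [h]) l []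
  | true =>
    rw [PySem.List.sorted_rev_eq_foldl_insertBy, PySem.List.sorted_rev_eq_foldl_insertBy]
    simpa using pv_foldl_insertBy_map f _ _ (fun a y => by simp [h]) l []

theorem pv_lookup_head (p0 : String × List Int) (t : List (String × List Int)) :
    pvLookup (p0 :: t) (((p0 :: t).map Prod.fst).headD "") = p0.2 := by
  simp [pvLookup, List.find?]

theorem pv_lookup_self (d : List (String × List Int)) (hnd : (d.map Prod.fst).Nodup)
    {p : String × List Int} (hp : p ∈ d) : pvLookup d p.1 = p.2 := by
  induction d with
  | nil => cases hp
  | cons q t ih =>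
    simp only [List.map_cons, List.nodup_cons] at hnd
    rcases List.mem_cons.mp hp with rfl | hpt
    · simp [pvLookup, List.find?]
    · have hne : (q.1 == p.1) = false := by
        simp only [beq_eq_false_iff_ne, ne_eq]
        intro he
        exact hnd.1 (he ▸ List.mem_map_of_mem hpt)
      simpa [pvLookup, List.find?, hne] using ih hnd.2 hpt

-- the row dict built for index i, as an items list
theorem pv_row_items (d : List (String × List Int)) (hnd : (d.map Prod.fst).Nodup) (i : Int) :
    (d.foldl (fun obj p =>
        obj.insert p.1 (PySem.List.pyGetD (pvLookup d p.1) i 0)) PySem.Dict.empty).items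
      = d.map (fun p => (p.1, PySem.List.pyGetD (pvLookup d p.1) i 0)) := by
  simpa using PySem.Dict.items_foldl_insert_fresh d Prod.fst
    (fun p => PySem.List.pyGetD (pvLookup d p.1) i 0) PySem.Dict.empty
    (fun a _ => PySem.Dict.contains_empty _) hnd

theorem pv_row_getD (d : List (String × List Int)) (hnd : (d.map Prod.fst).Nodup) (i : Int)
    {p : String × List Int} (hp : p ∈ d) :
    (d.foldl (fun obj q =>
        obj.insert q.1 (PySem.List.pyGetD (pvLookup d q.1) i 0)) PySem.Dict.empty).getD p.1 0
      = PySem.List.pyGetD (pvLookup d p.1) i 0 := by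
  apply PySem.Dict.getD_of_mem_items
  · rw [pv_row_items d hnd i]
    exact List.mem_map_of_mem hp
  · show (PySem.Dict.items _).map Prod.fst |>.Nodup
    rw [pv_row_items d hnd i, List.map_map]
    exact hnd

theorem OrdenarDiccionario_spec_aux (d : List (String × List Int)) (clave : String)
    (descendente : Bool) (hpre : Pre_OrdenarDiccionario d clave descendente) :
    OrdenarDiccionario d clave descendente = OrdenarDiccionario_alt d clave descendente := by
  obtain ⟨hnd, hlen⟩ := hpre
  unfold OrdenarDiccionario OrdenarDiccionario_alt
  by_cases hc : clave ∈ d.map Prod.fst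
  · simp only [hc, if_pos]
    obtain ⟨p0, t, rfl⟩ : ∃ p0 t, d = p0 :: t := by
      cases d with
      | nil => simp at hc
      | cons p0 t => exact ⟨p0, t, rfl⟩
    rw [pv_lookup_head]
    set D := p0 :: t with hD
    set n : Nat := p0.2.length with hn
    have hhead : (D.headD ("", [])).2.length = n := rfl
    rw [hhead]
    by_cases h0 : 0 < n
    · have h0' : ¬ n = 0 := Nat.pos_iff_ne_zero.mp h0
      simp only [h0, if_pos, h0']
      -- name the pieces
      set mkRow : Int → PySem.Dict String Int := fun i =>
        D.foldl (fun obj p =>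
          obj.insert p.1 (PySem.List.pyGetD (pvLookup D p.1) i 0)) PySem.Dict.empty with hmk
      set idx := PySem.List.pyRange 0 (n : Int) 1 with hidx
      set order := PySem.List.sorted idx
        (fun i => PySem.List.pyGetD (pvLookup D clave) i 0) (!descendente) with horder
      -- newArr is the list of row dicts
      rw [PySem.List.foldl_append_singleton_eq_map]
      simp only [List.nil_append]
      -- the row key equals the key-column entry
      obtain ⟨pc, hpc, hpc1⟩ := List.mem_map.mp hc
      have hkey : ∀ i : Int, (mkRow i).getD clave 0 = PySem.List.pyGetD (pvLookup D clave) i 0 := by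
        intro i
        rw [← hpc1]
        exact pv_row_getD D hnd i hpc
      -- sorting the mapped rows = mapping the sorted indices
      have hsort : PySem.List.sorted (idx.map mkRow) (fun obj => obj.getD clave 0) (!descendente)
          = order.map mkRow :=
        pv_sorted_map mkRow (fun obj => obj.getD clave 0) _ hkey idx (!descendente)
      rw [hsort]
      -- the rebuilt columns
      have hlenL : ((order.map mkRow).length : Int) = (n : Int) := by
        simp [horder, PySem.List.length_sorted, hidx, PySem.List.pyRange_zero_nat]
      have hcols : ∀ p ∈ D,
          idx.map (fun i => (PySem.List.pyGetD (order.map mkRow) i PySem.Dict.empty).getD p.1 0)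
            = order.map (fun i => PySem.List.pyGetD p.2 i 0) := by
        intro p hp
        have hidxL : idx = PySem.List.pyRange 0 (PySem.List.len (order.map mkRow)) 1 := by
          rw [hidx]
          show PySem.List.pyRange 0 (n : Int) 1 = _
          rw [PySem.List.len, hlenL]
        calc idx.map (fun i => (PySem.List.pyGetD (order.map mkRow) i PySem.Dict.empty).getD p.1 0)
            = (idx.map (fun i => PySem.List.pyGetD (order.map mkRow) i PySem.Dict.empty)).map
                (fun obj => obj.getD p.1 0) := by rw [List.map_map]; rfl
          _ = (order.map mkRow).map (fun obj => obj.getD p.1 0) := by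
                rw [hidxL, PySem.List.map_pyGetD_pyRange_zero]
          _ = order.map (fun i => (mkRow i).getD p.1 0) := by rw [List.map_map]; rfl
          _ = order.map (fun i => PySem.List.pyGetD p.2 i 0) := by
                apply List.map_congr_left
                intro i _
                rw [pv_row_getD D hnd i hp, pv_lookup_self D hnd hp]
      -- res, built over fresh distinct keys, is the mapped list
      rw [PySem.Dict.items_foldl_insert_fresh D Prod.fst _ PySem.Dict.empty
        (fun a _ => PySem.Dict.contains_empty _) hnd]
      simp only [PySem.Dict.empty, List.nil_append]
      congr 1
      apply List.map_congr_left
      intro p hp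
      rw [PySem.List.foldl_append_singleton_eq_map]
      simp only [List.nil_append]
      exact congrArg (fun c => (p.1, c)) (hcols p hp)
    · have h0' : n = 0 := Nat.eq_zero_of_not_pos h0
      simp [h0']
  · simp [hc]

-- ===== VERDICT (by name: the statement is the Claim_ definition above) =====
theorem OrdenarDiccionario_spec : Claim_equal_OrdenarDiccionario := by
  intro d clave descendente _ hpre
  unfold Spec_OrdenarDiccionario
  exact OrdenarDiccionario_spec_aux d clave descendente hpre
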